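-- pv_equiv track=rewrite | github.com/meghnagram/OPPE2-SEP-2024-SET2 | Section2-Problem1-2024-SEP-SET2.py | count_vowels_and_consonants_in_even_indices
-- ===== SOURCE A (Python) =====
-- def count_vowels_and_consonants_in_even_indices(s: str) -> tuple:
--     """
--     Counts the number of vowels and consonants at even indices in the given string.
--
--     Args:
--         s (str): The input string.
--
--     Returns:
--         tuple: A tuple containing two integers:
--             - The first integer is the count of vowels at even indices.
--             - The second integer is the count of consonants at even indices.
--
--     Example:
--         >>> count_vowels_and_consonants_in_even_indices("example1")
--         (3, 1)
--
--         >>> count_vowels_and_consonants_in_even_indices("hello")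
--         (1, 2)
--     """
--
--
--     vowel_count = 0
--     consonant_count = 0
--     for c in s[::2].lower():
--         if c in "aeiou":
--             vowel_count += 1
--         elif c.isalpha():
--             consonant_count += 1
--     return vowel_count, consonant_count
-- ===== SOURCE B (Python) =====
-- def count_vowels_and_consonants_in_even_indices(s: str) -> tuple:
--     t = s[::2].lower()
--     cnt = {}
--     for c in t:
--         cnt[c] = cnt.get(c, 0) + 1
--     vowel_count = sum(n for c, n in cnt.items() if c in "aeiou")
--     consonant_count = sum(n for c, n in cnt.items() if c.isalpha() and c not in "aeiou")
--     return vowel_count, consonant_count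
-- ===== Notes on version B (the rewrite author's own statement) =====
-- stated objective: alternative
-- what changed: B tallies the even-indexed lowercased characters into a frequency dictionary in one pass and then classifies only the distinct keys (summing their counts), instead of classifying every character inline with two running counters.
import Mathlib
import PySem

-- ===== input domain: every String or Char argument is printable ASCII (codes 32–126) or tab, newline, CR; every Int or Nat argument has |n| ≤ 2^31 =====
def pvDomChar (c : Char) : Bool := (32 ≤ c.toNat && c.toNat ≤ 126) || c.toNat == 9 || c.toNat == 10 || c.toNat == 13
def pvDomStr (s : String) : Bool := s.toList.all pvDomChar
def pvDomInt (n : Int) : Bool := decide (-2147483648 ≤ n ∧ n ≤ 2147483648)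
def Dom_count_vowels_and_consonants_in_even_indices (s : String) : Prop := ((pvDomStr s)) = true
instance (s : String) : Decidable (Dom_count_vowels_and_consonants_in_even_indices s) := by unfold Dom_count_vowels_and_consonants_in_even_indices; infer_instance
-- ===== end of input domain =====

-- B replaces A's inline per-character classification with a one-pass frequency dictionary
-- whose distinct keys are then classified and their counts summed (alternative decomposition).

-- ===== PORT A =====
-- 'c in "aeiou"' for the single character c
def pvIsVowel (c : Char) : Bool := PySem.Chars.isIn [c] "aeiou".toList

def count_vowels_and_consonants_in_even_indices (s : String) : Int × Int :=
  let t := PySem.Chars.lower ((PySem.List.slice? s.toList none none 2).getD [])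
  let r := t.foldl (fun (acc : Int × Int) c =>
    if pvIsVowel c then (acc.1 + 1, acc.2)
    else if PySem.Chars.isalpha c then (acc.1, acc.2 + 1)
    else acc) (0, 0)
  r

-- ===== PORT B =====
def count_vowels_and_consonants_in_even_indices_alt (s : String) : Int × Int :=
  let t := PySem.Chars.lower ((PySem.List.slice? s.toList none none 2).getD [])
  let cnt := t.foldl (fun (d : PySem.Dict Char Int) c => d.insert c (d.getD c 0 + 1)) PySem.Dict.empty
  let vowel_count := ((cnt.items.filter (fun p => pvIsVowel p.1)).map (·.2)).sum
  let consonant_count := ((cnt.items.filter (fun p => PySem.Chars.isalpha p.1 && !pvIsVowel p.1)).map (·.2)).sum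
  (vowel_count, consonant_count)

-- ===== PRECONDITION & SPEC =====
def Spec_count_vowels_and_consonants_in_even_indices (s : String) (out : Int × Int) : Prop := out = count_vowels_and_consonants_in_even_indices_alt s
instance (s : String) (out : Int × Int) : Decidable (Spec_count_vowels_and_consonants_in_even_indices s out) := by unfold Spec_count_vowels_and_consonants_in_even_indices; infer_instance

-- ===== CLAIM (what is proved, stated in full; the proofs are below) =====
def Claim_equal_count_vowels_and_consonants_in_even_indices : Prop := ∀ (s : String), Dom_count_vowels_and_consonants_in_even_indices s → Spec_count_vowels_and_consonants_in_even_indices s (count_vowels_and_consonants_in_even_indices s)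

-- ===== LEMMAS AND PROOFS =====

-- A's loop computes the two countP's of its classification predicates
lemma pvFoldA (t : List Char) (v c : Int) :
    t.foldl (fun (acc : Int × Int) x =>
      if pvIsVowel x then (acc.1 + 1, acc.2)
      else if PySem.Chars.isalpha x then (acc.1, acc.2 + 1)
      else acc) (v, c)
    = (v + (t.countP pvIsVowel : Int),
       c + (t.countP (fun x => PySem.Chars.isalpha x && !pvIsVowel x) : Int)) := by
  induction t generalizing v c with
  | nil => simp
  | cons x t ih =>
    by_cases hv : pvIsVowel x
    · simp [hv, ih]; ring
    · by_cases ha : PySem.Chars.isalpha x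
      · simp [hv, ha, ih]; ring
      · simp [hv, ha, ih]

-- an indicator sum over a duplicate-free list is a membership test
lemma pvSumIte (a : Char) (L : List Char) (hnd : L.Nodup) :
    (L.map (fun k => if k = a then (1 : Int) else 0)).sum = if a ∈ L then 1 else 0 := by
  induction L with
  | nil => simp
  | cons x L ih =>
    rcases List.nodup_cons.mp hnd with ⟨hx, hL⟩
    by_cases hxa : x = a
    · subst hxa
      have hz : (L.map (fun k => if k = x then (1 : Int) else 0)).sum = 0 := by
        refine List.sum_eq_zero ?_
        intro y hy
        rcases List.mem_map.mp hy with ⟨k, hk, rfl⟩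
        have hne : k ≠ x := fun h => hx (h ▸ hk)
        simp [hne]
      simp [hz]
    · simp [hxa, ih hL, Ne.symm hxa]

-- summing l.count over the distinct keys selected by p is l.countP p
lemma pvSumCount (p : Char → Bool) (l : List Char) :
    ((((PySem.Set.ofList l).filter p).map (fun k => (l.count k : Int))).sum)
      = (l.countP p : Int) := by
  induction l using List.reverseRecOn with
  | nil => simp [PySem.Set.ofList]
  | append_singleton l a ih =>
    have hset : PySem.Set.ofList (l ++ [a]) = PySem.Set.add (PySem.Set.ofList l) a := by
      simp [PySem.Set.ofList_eq_foldl, List.foldl_append, PySem.Set.add]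
    have hcnt : ∀ k, ((l ++ [a]).count k : Int)
        = (l.count k : Int) + (if k = a then 1 else 0) := by
      intro k
      by_cases h : k = a
      · subst h; simp [List.count_append]
      · have h' : ¬a = k := fun h2 => h h2.symm
        simp [List.count_append, h, h']
    have hcp : ((l ++ [a]).countP p : Int) = (l.countP p : Int) + (if p a then 1 else 0) := by
      by_cases hpa : p a <;> simp [List.countP_append, hpa]
    by_cases hm : a ∈ l
    · have hadd : PySem.Set.add (PySem.Set.ofList l) a = PySem.Set.ofList l := by
        simp [PySem.Set.add]
        exact hm
      rw [hset, hadd]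
      have := pvSumIte a ((PySem.Set.ofList l).filter p)
        ((PySem.Set.nodup_ofList l).filter p)
      rw [List.map_congr_left (fun k _ => hcnt k), PySem.List.sum_map_add_int, ih, this, hcp]
      by_cases hpa : p a
      · simp [List.mem_filter, (PySem.Set.mem_ofList _ _).mpr hm, hpa]
      · have : a ∉ (PySem.Set.ofList l).filter p := fun h => hpa (List.of_mem_filter h)
        simp [this, hpa]
    · have hadd : PySem.Set.add (PySem.Set.ofList l) a = PySem.Set.ofList l ++ [a] := by
        simp [PySem.Set.add]
        exact hm
      rw [hset, hadd, List.filter_append, List.map_append, List.sum_append]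
      have h1 : ((PySem.Set.ofList l).filter p).map (fun k => ((l ++ [a]).count k : Int))
          = ((PySem.Set.ofList l).filter p).map (fun k => (l.count k : Int)) := by
        refine List.map_congr_left (fun k hk => ?_)
        have hkl : k ∈ l := (PySem.Set.mem_ofList _ _).mp (List.mem_of_mem_filter hk)
        have hka : k ≠ a := fun h => hm (h ▸ hkl)
        rw [hcnt k, if_neg hka, add_zero]
      rw [h1, ih, hcp]
      by_cases hpa : p a
      · simp [hpa, List.count_append, List.count_eq_zero_of_not_mem hm]
      · simp [hpa]

-- ===== VERDICT (by name: the statement is the Claim_ definition above) =====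
theorem count_vowels_and_consonants_in_even_indices_spec : Claim_equal_count_vowels_and_consonants_in_even_indices := by
  intro s _
  show _ = _
  unfold count_vowels_and_consonants_in_even_indices count_vowels_and_consonants_in_even_indices_alt
  simp only [PySem.Dict.foldl_insert_getD_add_one_eq_counter, PySem.Dict.items_counter,
    List.filter_map, List.map_map, pvFoldA, Prod.mk.injEq]
  refine ⟨?_, ?_⟩ <;> (rw [← pvSumCount]; simp [Function.comp_def])
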